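-- pv_equiv track=rewrite | github.com/rewnozom/NLP_bot-engine | NLP_Product_Data_Extractor.py | is_valid_ean
-- ===== SOURCE A (Python) =====
-- def is_valid_ean(ean: str) -> bool:
--     """
--     Validate EAN code using checksum
--
--     Args:
--         ean: The EAN code to validate
--
--     Returns:
--         True if valid, False otherwise
--     """
--     if not ean.isdigit():
--         return False
--
--     # EAN-8, EAN-13, UPC (12 digits), or GTIN-14
--     if len(ean) not in [8, 12, 13, 14]:
--         return False
--
--     # Check digit calculation
--     total = 0
--     for i, digit in enumerate(reversed(ean[:-1])):
--         multiplier = 3 if i % 2 == 0 else 1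
--         total += int(digit) * multiplier
--
--     check_digit = (10 - (total % 10)) % 10
--
--     return check_digit == int(ean[-1])
-- ===== SOURCE B (Python) =====
-- def is_valid_ean(ean: str) -> bool:
--     """
--     Validate EAN code using checksum
--
--     Args:
--         ean: The EAN code to validate
--
--     Returns:
--         True if valid, False otherwise
--     """
--     if not ean.isdigit():
--         return False
--     if len(ean) not in (8, 12, 13, 14):
--         return False
--     # Normalize to GTIN-14 by left zero-padding (padding preserves the checksum),
--     # then take the two fixed stride-2 slices of the 13 data positions and compare
--     # the derived check digit with the last position.
--     s = ean.rjust(14, '0')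
--     odd = sum(int(c) for c in s[0:13:2])    # weight-3 positions, left to right
--     even = sum(int(c) for c in s[1:13:2])   # weight-1 positions
--     return (10 - (3 * odd + even) % 10) % 10 == int(s[13])
-- ===== Notes on version B (the rewrite author's own statement) =====
-- stated objective: alternative
-- what changed: Instead of A's reversed-enumerate loop over ean[:-1] with alternating 3/1 weights, B normalizes the code to GTIN-14 by left zero-padding and sums two fixed stride-2 slices of the 13 data positions (weight-3 and weight-1 columns), so the weights become position-fixed and no reversal or per-index parity test is needed.
import Mathlib
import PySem

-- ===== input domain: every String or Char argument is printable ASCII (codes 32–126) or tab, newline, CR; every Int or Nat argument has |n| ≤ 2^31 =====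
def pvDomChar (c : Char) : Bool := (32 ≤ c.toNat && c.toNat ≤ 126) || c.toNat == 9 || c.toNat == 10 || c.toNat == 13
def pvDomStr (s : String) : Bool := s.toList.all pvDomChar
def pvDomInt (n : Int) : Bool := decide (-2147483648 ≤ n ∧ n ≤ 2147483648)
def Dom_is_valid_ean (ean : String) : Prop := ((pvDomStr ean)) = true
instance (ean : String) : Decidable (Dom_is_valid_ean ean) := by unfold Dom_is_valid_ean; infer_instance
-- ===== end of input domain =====

-- B validates the code by normalizing to GTIN-14 with left zero-padding and summing two
-- fixed stride-2 slices of the 13 data positions, instead of A's reversed-enumerate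
-- alternating-weight loop over ean[:-1] (objective: alternative decomposition).


-- ===== PORT A =====
def is_valid_ean (ean : String) : Bool :=
  if !PySem.Str.strIsdigit ean then false
  else if !([8, 12, 13, 14].contains (PySem.Str.len ean)) then false
  else
    let total : Int :=
      (PySem.List.enumerate (PySem.List.slice ean.toList none (some (-1))).reverse 0).foldl
        (fun t p =>
          t + ((PySem.Int.ofChars? [p.2]).getD 0) *
            (if PySem.Int.mod p.1 2 == 0 then 3 else 1)) 0
    let check_digit := PySem.Int.mod (10 - PySem.Int.mod total 10) 10
    check_digit == (PySem.Int.ofChars? [PySem.List.pyGetD ean.toList (-1) ' ']).getD 0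

-- ===== PORT B =====
-- s = ean.rjust(14, '0') is ported exactly as left zero-padding (len(ean) ≤ 14 here);
-- s[0:13:2] / s[1:13:2] are PySem.List.slice?; s[13] is in range, so pyGetD is exact.
def is_valid_ean_alt (ean : String) : Bool :=
  if !PySem.Str.strIsdigit ean then false
  else if !([8, 12, 13, 14].contains (PySem.Str.len ean)) then false
  else
    let s : List Char := List.replicate (14 - ean.toList.length) '0' ++ ean.toList
    let odd : Int :=
      ((PySem.List.slice? s (some 0) (some 13) 2).getD []).foldl
        (fun a c => a + (PySem.Int.ofChars? [c]).getD 0) 0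
    let even : Int :=
      ((PySem.List.slice? s (some 1) (some 13) 2).getD []).foldl
        (fun a c => a + (PySem.Int.ofChars? [c]).getD 0) 0
    PySem.Int.mod (10 - PySem.Int.mod (3 * odd + even) 10) 10
      == (PySem.Int.ofChars? [PySem.List.pyGetD s 13 ' ']).getD 0

-- ===== PRECONDITION & SPEC =====
def Spec_is_valid_ean (ean : String) (out : Bool) : Prop := out = is_valid_ean_alt ean
instance (ean : String) (out : Bool) : Decidable (Spec_is_valid_ean ean out) := by unfold Spec_is_valid_ean; infer_instance

-- ===== CLAIM =====
def Claim_equal_is_valid_ean : Prop := ∀ (ean : String), Dom_is_valid_ean ean → Spec_is_valid_ean ean (is_valid_ean ean)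

-- ===== LEMMAS AND PROOFS =====

theorem pv_len8 (l : List Char) (h : l.length = 8) : ∃ c0, ∃ c1, ∃ c2, ∃ c3, ∃ c4, ∃ c5, ∃ c6, ∃ c7, l = [c0, c1, c2, c3, c4, c5, c6, c7] := by
  rcases l with _|⟨c0, l⟩; · simp at h
  rcases l with _|⟨c1, l⟩; · simp at h
  rcases l with _|⟨c2, l⟩; · simp at h
  rcases l with _|⟨c3, l⟩; · simp at h
  rcases l with _|⟨c4, l⟩; · simp at h
  rcases l with _|⟨c5, l⟩; · simp at h
  rcases l with _|⟨c6, l⟩; · simp at h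
  rcases l with _|⟨c7, l⟩; · simp at h
  rcases l with _|⟨x, l⟩
  · exact ⟨c0, c1, c2, c3, c4, c5, c6, c7, rfl⟩
  · simp at h
theorem pv_len12 (l : List Char) (h : l.length = 12) : ∃ c0, ∃ c1, ∃ c2, ∃ c3, ∃ c4, ∃ c5, ∃ c6, ∃ c7, ∃ c8, ∃ c9, ∃ c10, ∃ c11, l = [c0, c1, c2, c3, c4, c5, c6, c7, c8, c9, c10, c11] := by
  rcases l with _|⟨c0, l⟩; · simp at h
  rcases l with _|⟨c1, l⟩; · simp at h
  rcases l with _|⟨c2, l⟩; · simp at h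
  rcases l with _|⟨c3, l⟩; · simp at h
  rcases l with _|⟨c4, l⟩; · simp at h
  rcases l with _|⟨c5, l⟩; · simp at h
  rcases l with _|⟨c6, l⟩; · simp at h
  rcases l with _|⟨c7, l⟩; · simp at h
  rcases l with _|⟨c8, l⟩; · simp at h
  rcases l with _|⟨c9, l⟩; · simp at h
  rcases l with _|⟨c10, l⟩; · simp at h
  rcases l with _|⟨c11, l⟩; · simp at h
  rcases l with _|⟨x, l⟩
  · exact ⟨c0, c1, c2, c3, c4, c5, c6, c7, c8, c9, c10, c11, rfl⟩
  · simp at h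
theorem pv_len13 (l : List Char) (h : l.length = 13) : ∃ c0, ∃ c1, ∃ c2, ∃ c3, ∃ c4, ∃ c5, ∃ c6, ∃ c7, ∃ c8, ∃ c9, ∃ c10, ∃ c11, ∃ c12, l = [c0, c1, c2, c3, c4, c5, c6, c7, c8, c9, c10, c11, c12] := by
  rcases l with _|⟨c0, l⟩; · simp at h
  rcases l with _|⟨c1, l⟩; · simp at h
  rcases l with _|⟨c2, l⟩; · simp at h
  rcases l with _|⟨c3, l⟩; · simp at h
  rcases l with _|⟨c4, l⟩; · simp at h
  rcases l with _|⟨c5, l⟩; · simp at h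
  rcases l with _|⟨c6, l⟩; · simp at h
  rcases l with _|⟨c7, l⟩; · simp at h
  rcases l with _|⟨c8, l⟩; · simp at h
  rcases l with _|⟨c9, l⟩; · simp at h
  rcases l with _|⟨c10, l⟩; · simp at h
  rcases l with _|⟨c11, l⟩; · simp at h
  rcases l with _|⟨c12, l⟩; · simp at h
  rcases l with _|⟨x, l⟩
  · exact ⟨c0, c1, c2, c3, c4, c5, c6, c7, c8, c9, c10, c11, c12, rfl⟩
  · simp at h
theorem pv_len14 (l : List Char) (h : l.length = 14) : ∃ c0, ∃ c1, ∃ c2, ∃ c3, ∃ c4, ∃ c5, ∃ c6, ∃ c7, ∃ c8, ∃ c9, ∃ c10, ∃ c11, ∃ c12, ∃ c13, l = [c0, c1, c2, c3, c4, c5, c6, c7, c8, c9, c10, c11, c12, c13] := by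
  rcases l with _|⟨c0, l⟩; · simp at h
  rcases l with _|⟨c1, l⟩; · simp at h
  rcases l with _|⟨c2, l⟩; · simp at h
  rcases l with _|⟨c3, l⟩; · simp at h
  rcases l with _|⟨c4, l⟩; · simp at h
  rcases l with _|⟨c5, l⟩; · simp at h
  rcases l with _|⟨c6, l⟩; · simp at h
  rcases l with _|⟨c7, l⟩; · simp at h
  rcases l with _|⟨c8, l⟩; · simp at h
  rcases l with _|⟨c9, l⟩; · simp at h
  rcases l with _|⟨c10, l⟩; · simp at h
  rcases l with _|⟨c11, l⟩; · simp at h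
  rcases l with _|⟨c12, l⟩; · simp at h
  rcases l with _|⟨c13, l⟩; · simp at h
  rcases l with _|⟨x, l⟩
  · exact ⟨c0, c1, c2, c3, c4, c5, c6, c7, c8, c9, c10, c11, c12, c13, rfl⟩
  · simp at h

-- simp set that evaluates both ports on an explicit list of characters
theorem pv_len_eq (s : String) : PySem.Str.len s = (s.toList.length : Int) := by
  simp [PySem.Str.len]

theorem is_valid_ean_spec : Claim_equal_is_valid_ean := by
  intro ean _
  unfold Spec_is_valid_ean is_valid_ean is_valid_ean_alt
  cases hd : PySem.Str.strIsdigit ean with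
  | false => simp only [Bool.not_false, if_true]
  | true =>
  simp only [Bool.not_true, Bool.false_eq_true, if_false]
  cases hl : [8, 12, 13, 14].contains (PySem.Str.len ean) with
  | false => simp only [Bool.not_false, if_true]
  | true =>
  simp only [Bool.not_true, Bool.false_eq_true, if_false]
  rw [pv_len_eq] at hl
  simp only [List.contains_eq_mem, List.mem_cons, List.not_mem_nil, or_false, decide_eq_true_eq] at hl
  have hlen : ean.toList.length = 8 ∨ ean.toList.length = 12 ∨ ean.toList.length = 13 ∨ ean.toList.length = 14 := by
    omega
  rcases hlen with hlen | hlen | hlen | hlen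
  · obtain ⟨c0, c1, c2, c3, c4, c5, c6, c7, hs⟩ := pv_len8 ean.toList hlen
    rw [hs]
    simp only [PySem.List.slice_to_neg_one]
    simp [PySem.List.slice?, PySem.List.sliceIndices, List.range_succ,
          PySem.List.pyGetD, PySem.List.pyGet?, PySem.List.pyIdx?,
          PySem.List.enumerate_cons, PySem.List.enumerate_nil,
          List.replicate, PySem.Int.mod, Int.fmod_eq_emod]
    try simp only [show (PySem.Int.ofChars? ['0']).getD 0 = 0 from by decide]
    omega
  · obtain ⟨c0, c1, c2, c3, c4, c5, c6, c7, c8, c9, c10, c11, hs⟩ := pv_len12 ean.toList hlen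
    rw [hs]
    simp only [PySem.List.slice_to_neg_one]
    simp [PySem.List.slice?, PySem.List.sliceIndices, List.range_succ,
          PySem.List.pyGetD, PySem.List.pyGet?, PySem.List.pyIdx?,
          PySem.List.enumerate_cons, PySem.List.enumerate_nil,
          List.replicate, PySem.Int.mod, Int.fmod_eq_emod]
    try simp only [show (PySem.Int.ofChars? ['0']).getD 0 = 0 from by decide]
    omega
  · obtain ⟨c0, c1, c2, c3, c4, c5, c6, c7, c8, c9, c10, c11, c12, hs⟩ := pv_len13 ean.toList hlen
    rw [hs]
    simp only [PySem.List.slice_to_neg_one]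
    simp [PySem.List.slice?, PySem.List.sliceIndices, List.range_succ,
          PySem.List.pyGetD, PySem.List.pyGet?, PySem.List.pyIdx?,
          PySem.List.enumerate_cons, PySem.List.enumerate_nil,
          List.replicate, PySem.Int.mod, Int.fmod_eq_emod]
    try simp only [show (PySem.Int.ofChars? ['0']).getD 0 = 0 from by decide]
    omega
  · obtain ⟨c0, c1, c2, c3, c4, c5, c6, c7, c8, c9, c10, c11, c12, c13, hs⟩ := pv_len14 ean.toList hlen
    rw [hs]
    simp only [PySem.List.slice_to_neg_one]
    simp [PySem.List.slice?, PySem.List.sliceIndices, List.range_succ,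
          PySem.List.pyGetD, PySem.List.pyGet?, PySem.List.pyIdx?,
          PySem.List.enumerate_cons, PySem.List.enumerate_nil,
          List.replicate, PySem.Int.mod, Int.fmod_eq_emod]
    try simp only [show (PySem.Int.ofChars? ['0']).getD 0 = 0 from by decide]
    omega
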